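-- pv_equiv track=rewrite | github.com/JordanKRich/CSE-545 | Basic Report and Code/FinalProject/JobSequencing.py | create_woc_solution
-- ===== SOURCE A (Python) =====
-- def create_woc_solution(best_solutions):
--     job_sequence_votes = {}
--     for solution in best_solutions:
--         for position, job in enumerate(solution):
--             job_tuple = tuple(job)
--             if job_tuple not in job_sequence_votes:
--                 job_sequence_votes[job_tuple] = 0
--             job_sequence_votes[job_tuple] += 1
--
--     woc_solution = []
--     added_jobs = set()
--
--     # Add most common jobs first
--     while len(woc_solution) < len(best_solutions[0]):
--         most_common_job_tuple = max(job_sequence_votes, key=lambda k: (job_sequence_votes[k], k not in added_jobs))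
--         if most_common_job_tuple not in added_jobs:
--             woc_solution.append(list(most_common_job_tuple))
--             added_jobs.add(most_common_job_tuple)
--
--         # Remove the job from voting to prevent duplicates
--         del job_sequence_votes[most_common_job_tuple]
--
--     # If any jobs are missing, add them
--     all_jobs = {tuple(job) for solution in best_solutions for job in solution}
--     missing_jobs = all_jobs - added_jobs
--     for job in missing_jobs:
--         woc_solution.append(list(job))
--
--     return woc_solution
-- ===== SOURCE B (Python) =====
-- def create_woc_solution(best_solutions):
--     votes = {}
--     for solution in best_solutions:
--         for job in solution:
--             t = tuple(job)
--             votes[t] = votes.get(t, 0) + 1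
--     k = len(best_solutions[0])
--     ordered = sorted(votes, key=lambda t: votes[t], reverse=True)
--     woc_solution = [list(t) for t in ordered[:k]]
--     added_jobs = set(ordered[:k])
--     # If any jobs are missing, add them (same block as before)
--     all_jobs = {tuple(job) for solution in best_solutions for job in solution}
--     for job in all_jobs - added_jobs:
--         woc_solution.append(list(job))
--     return woc_solution
-- ===== Notes on version B (the rewrite author's own statement) =====
-- stated objective: faster
-- what changed: A repeatedly rescans the whole vote dict with max() and deletes the winner (selection); B builds the counts once and does a single stable descending sort of the distinct jobs by vote count, keeping the missing-jobs block unchanged.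
import Mathlib
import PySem

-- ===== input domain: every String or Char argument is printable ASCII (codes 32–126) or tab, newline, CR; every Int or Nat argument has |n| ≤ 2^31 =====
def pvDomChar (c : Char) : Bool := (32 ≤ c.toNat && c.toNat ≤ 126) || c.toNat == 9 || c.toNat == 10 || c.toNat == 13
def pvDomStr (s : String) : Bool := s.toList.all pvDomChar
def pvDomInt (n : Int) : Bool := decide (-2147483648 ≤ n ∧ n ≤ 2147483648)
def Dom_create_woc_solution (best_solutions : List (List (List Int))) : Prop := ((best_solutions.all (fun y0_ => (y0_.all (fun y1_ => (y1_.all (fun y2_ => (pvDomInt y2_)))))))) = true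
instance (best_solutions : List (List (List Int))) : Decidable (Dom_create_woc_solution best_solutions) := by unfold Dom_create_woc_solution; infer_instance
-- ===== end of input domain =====

-- B replaces A's repeated max()-scan-and-delete selection loop by a single stable descending
-- sort of the distinct jobs by vote count; the missing-jobs block is kept unchanged.
-- Both Pythons use CPython sets for the missing-jobs block; each port carries its own
-- hand-written model of CPython's set (3.11 setobject.c), written independently: A's over
-- (hash, key) entries with list-of-indices probe scans, B's over (key, hash) entries with
-- counter-based probe scans; the bridge lemmas below the claim block prove them equal.

-- ---- PORT A's model of the CPython set for tuples of ints, used for 'set(...)' and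
-- ---- 'all_jobs - added_jobs' (exact on Dom's ints)

def pvHashInt (i : Int) : UInt64 :=
  let M : Int := 2305843009213693951  -- 2^61 - 1  (CPython's _PyHASH_MODULUS)
  let h : Int := if 0 ≤ i then i % M else -((-i) % M)
  let h : Int := if h = -1 then -2 else h
  if 0 ≤ h then UInt64.ofNat h.toNat else UInt64.ofNat (18446744073709551616 + h).toNat

def pvHashTuple (t : List Int) : UInt64 :=
  let p1 : UInt64 := 11400714785074694791
  let p2 : UInt64 := 14029467366897019727
  let p5 : UInt64 := 2870177450012600261
  let acc := t.foldl (fun acc it =>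
    let acc := acc + pvHashInt it * p2
    let acc := (acc <<< 31) ||| (acc >>> 33)
    acc * p1) p5
  let acc := acc + (UInt64.ofNat t.length ^^^ (p5 ^^^ 3527539))
  if acc = 18446744073709551615 then 1546275796 else acc

-- one CPython hash-table for tuples: slots of (hash, key)
def pvSlot (table : List (Option (UInt64 × List Int))) (i : Nat) :
    Option (UInt64 × List Int) := (table.getD i none).bind some

-- linear-probe scan (LINEAR_PROBES = 9): some (some j) = free slot j, some none = key present
def pvScan (table : List (Option (UInt64 × List Int))) (h : UInt64) (key : List Int) :
    List Nat → Option (Option Nat)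
  | [] => none
  | j :: rest =>
    match pvSlot table j with
    | none => some (some j)
    | some e => if e.1 = h ∧ e.2 = key then some none else pvScan table h key rest

-- set_add_entry's search: none = already present, some i = insert at slot i
def pvFindSlot (table : List (Option (UInt64 × List Int))) (mask : Nat) (h : UInt64)
    (key : List Int) : Nat → Nat → Nat → Option Nat
  | 0, _, _ => some 0  -- fuel, never reached (the table always has free slots)
  | fuel + 1, i, perturb =>
    match pvSlot table i with
    | none => some i
    | some e =>
      if e.1 = h ∧ e.2 = key then none
      else
        match (if i + 9 ≤ mask then pvScan table h key ((List.range 9).map (fun j => i + 1 + j))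
               else none) with
        | some r => r
        | none =>
          pvFindSlot table mask h key fuel ((i * 5 + 1 + (perturb >>> 5)) &&& mask)
            (perturb >>> 5)

-- set_insert_clean's search (no equality tests)
def pvScanClean (table : List (Option (UInt64 × List Int))) : List Nat → Option Nat
  | [] => none
  | j :: rest => match pvSlot table j with
    | none => some j
    | some _ => pvScanClean table rest

def pvCleanSlot (table : List (Option (UInt64 × List Int))) (mask : Nat) :
    Nat → Nat → Nat → Nat
  | 0, i, _ => i
  | fuel + 1, i, perturb =>
    match pvSlot table i with
    | none => i
    | some _ =>
      match (if i + 9 ≤ mask then pvScanClean table ((List.range 9).map (fun j => i + 1 + j))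
             else none) with
      | some j => j
      | none =>
        pvCleanSlot table mask fuel ((i * 5 + 1 + (perturb >>> 5)) &&& mask) (perturb >>> 5)

structure PvPySet where
  table : List (Option (UInt64 × List Int))
  fill : Nat
  used : Nat
  deriving Repr, DecidableEq

def pvEmptySet : PvPySet := ⟨List.replicate 8 none, 0, 0⟩

-- PySet_MINSIZE 8 doubled while ≤ minused
def pvNewSize (minused : Nat) : Nat :=
  (List.range 64).foldl (fun acc _ => if acc ≤ minused then acc * 2 else acc) 8

def pvInsertClean (table : List (Option (UInt64 × List Int))) (e : UInt64 × List Int) :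
    List (Option (UInt64 × List Int)) :=
  let mask := table.length - 1
  let i := pvCleanSlot table mask (table.length * 64 + 64) (e.1.toNat &&& mask) e.1.toNat
  table.set i (some e)

def pvSetResize (s : PvPySet) (minused : Nat) : PvPySet :=
  let newsize := pvNewSize minused
  let table := (s.table.filterMap id).foldl pvInsertClean (List.replicate newsize none)
  ⟨table, s.used, s.used⟩

def pvSetAdd (s : PvPySet) (key : List Int) : PvPySet :=
  let h := pvHashTuple key
  let mask := s.table.length - 1
  match pvFindSlot s.table mask h key (s.table.length * 64 + 64) (h.toNat &&& mask) h.toNat with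
  | none => s
  | some i =>
    let s' : PvPySet := ⟨s.table.set i (some (h, key)), s.fill + 1, s.used + 1⟩
    if s'.fill * 5 ≥ mask * 3 then
      pvSetResize s' (if s'.used ≤ 50000 then s'.used * 4 else s'.used * 2)
    else s'

def pvSetElems (s : PvPySet) : List (List Int) := (s.table.filterMap id).map (fun e => e.2)

-- set_copy = set_merge into a fresh minsize-8 set
def pvSetCopy (so : PvPySet) : PvPySet :=
  let newsize := if so.used * 5 ≥ 21 then pvNewSize (so.used * 2) else 8
  if newsize = so.table.length then ⟨so.table, so.fill, so.used⟩
  else ⟨(so.table.filterMap id).foldl pvInsertClean (List.replicate newsize none),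
    so.used, so.used⟩

-- iteration order of 'set - other' (other given by its membership test and size)
def pvSetDiffElems (so : PvPySet) (notInOther : List Int → Bool) (otherSize : Nat) :
    List (List Int) :=
  if so.used / 4 > otherSize then
    (pvSetElems (pvSetCopy so)).filter notInOther
  else
    pvSetElems (((pvSetElems so).filter notInOther).foldl pvSetAdd pvEmptySet)

-- ===== PORT A =====

-- 'if job_tuple not in job_sequence_votes: ... = 0' followed by 'job_sequence_votes[job_tuple] += 1'
-- (the '+= 1' reads a key that is present at that point, so getD's default is never used)
def pvVoteStepA (d : PySem.Dict (List Int) Int) (t : List Int) : PySem.Dict (List Int) Int :=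
  let d1 := if d.contains t then d else d.insert t 0
  d1.insert t (d1.getD t 0 + 1)

-- the two nested 'for' loops building job_sequence_votes (position is unused by the loop body)
def pvVotesA (bs : List (List (List Int))) : PySem.Dict (List Int) Int :=
  bs.foldl (fun d sol => (PySem.List.enumerate sol 0).foldl (fun d pj => pvVoteStepA d pj.2) d)
    PySem.Dict.empty

-- the next two lemmas are cited by pvLoopA's decreasing_by: max(...) returns a present key and
-- 'del' of a present key shrinks the dict
theorem pvMax2Cons (k1 : List Int → Int) (k2 : List Int → Bool) (x y : List Int)
    (t : List (List Int)) :
    PySem.List.max2? (x :: y :: t) k1 k2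
      = PySem.List.max2?
          ((if (decide (k1 x < k1 y) || (!decide (k1 y < k1 x) && decide (k2 x < k2 y)))
            then y else x) :: t) k1 k2 := by
  show List.foldl _
      (if (decide (k1 x < k1 y) || (!decide (k1 y < k1 x) && decide (k2 x < k2 y))) = true
        then some y else some x) t
    = List.foldl _
      (some (if (decide (k1 x < k1 y) || (!decide (k1 y < k1 x) && decide (k2 x < k2 y)))
        then y else x)) t
  by_cases h : (decide (k1 x < k1 y) || (!decide (k1 y < k1 x) && decide (k2 x < k2 y))) = true
  · rw [if_pos h, if_pos h]
  · rw [if_neg h, if_neg h]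

theorem pvMax2Mem {k1 : List Int → Int} {k2 : List Int → Bool} :
    ∀ {l : List (List Int)} {m : List Int},
    PySem.List.max2? l k1 k2 = some m → m ∈ l := by
  have aux : ∀ (t : List (List Int)) (x m : List Int),
      PySem.List.max2? (x :: t) k1 k2 = some m → m ∈ x :: t := by
    intro t
    induction t with
    | nil =>
      intro x m h
      have : x = m := Option.some.inj h
      rw [← this]; exact List.mem_cons_self
    | cons y t ih =>
      intro x m h
      rw [pvMax2Cons] at h
      have := ih _ m h
      by_cases hc : (decide (k1 x < k1 y) || (!decide (k1 y < k1 x) && decide (k2 x < k2 y))) = true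
      · rw [if_pos hc] at this
        rcases List.mem_cons.mp this with rfl | hm
        · exact List.mem_cons_of_mem _ List.mem_cons_self
        · exact List.mem_cons_of_mem _ (List.mem_cons_of_mem _ hm)
      · rw [if_neg hc] at this
        rcases List.mem_cons.mp this with rfl | hm
        · exact List.mem_cons_self
        · exact List.mem_cons_of_mem _ (List.mem_cons_of_mem _ hm)
  intro l m h
  cases l with
  | nil => cases h
  | cons x t => exact aux t x m h

theorem pvSizeEraseLt (d : PySem.Dict (List Int) Int) (m : List Int) (h : m ∈ d.keys) :
    (d.erase m).size < d.size := by
  obtain ⟨p, hp, hpm⟩ := List.mem_map.mp h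
  have : (List.filter (fun p => !(p.1 == m)) d.items).length < d.items.length := by
    refine List.length_filter_lt_length_iff_exists.mpr ⟨p, hp, ?_⟩
    simp [hpm]
  simpa [PySem.Dict.erase, PySem.Dict.size] using this

-- the while loop; returns (woc_solution, added_jobs).  max(votes, key=lambda k: (votes[k],
-- k not in added_jobs)) is max2? over the dict's keys (Python compares the bool as 0/1, which
-- is exactly Bool's order); max of an emptied dict raises ValueError in Python — excluded by
-- Pre_, the port returns the state reached there.
def pvLoopA (target : Nat) (d : PySem.Dict (List Int) Int) (added : PySem.Set (List Int))
    (woc : List (List Int)) : List (List Int) × PySem.Set (List Int) :=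
  if woc.length < target then
    match hm : PySem.List.max2? d.keys (fun t => d.getD t 0) (fun t => !added.contains t) with
    | none => (woc, added)
    | some m =>
      if added.contains m then pvLoopA target (d.erase m) added woc
      else pvLoopA target (d.erase m) (added.add m) (woc ++ [m])
  else (woc, added)
  termination_by d.size
  decreasing_by
  · exact pvSizeEraseLt d m (pvMax2Mem hm)
  · exact pvSizeEraseLt d m (pvMax2Mem hm)

def create_woc_solution (best_solutions : List (List (List Int))) : List (List Int) :=
  let votes := pvVotesA best_solutions
  -- while len(woc_solution) < len(best_solutions[0]); best_solutions[0] raises IndexError on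
  -- the empty list — excluded by Pre_
  let st := pvLoopA (best_solutions.headD []).length votes PySem.Set.empty []
  -- all_jobs = {tuple(job) for solution in best_solutions for job in solution} (a CPython set)
  let all_jobs : PvPySet :=
    best_solutions.foldl (fun s sol => sol.foldl pvSetAdd s) pvEmptySet
  -- missing_jobs = all_jobs - added_jobs, appended in CPython's set-iteration order
  st.1 ++ pvSetDiffElems all_jobs (fun t => !st.2.contains t) st.2.length

-- ===== PORT B =====

-- ---- PORT B's own model of the same CPython set, written over (key, hash) entries with
-- ---- counter-based probe scans and a foldr table walk (proved equal to A's model below)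

def pvHashIntB (i : Int) : UInt64 :=
  let M : Int := 2305843009213693951  -- 2^61 - 1
  let r : Int := if i < 0 then -((-i) % M) else i % M
  let r2 : Int := if r = -1 then -2 else r
  if r2 < 0 then UInt64.ofNat (18446744073709551616 + r2).toNat else UInt64.ofNat r2.toNat

def pvHashStepB (acc : UInt64) (it : Int) : UInt64 :=
  let a := acc + pvHashIntB it * 14029467366897019727
  ((a <<< 31) ||| (a >>> 33)) * 11400714785074694791

def pvHashAccB : UInt64 → List Int → UInt64
  | acc, [] => acc
  | acc, it :: rest => pvHashAccB (pvHashStepB acc it) rest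

def pvHashTupleB (t : List Int) : UInt64 :=
  let r := pvHashAccB 2870177450012600261 t
    + (UInt64.ofNat t.length ^^^ (2870177450012600261 ^^^ 3527539))
  if r = 18446744073709551615 then 1546275796 else r

-- scan the n slots j, j+1, …, j+n-1: some (some j') = free slot, some none = stop hit
def pvLinB (tbl : List (Option (List Int × UInt64))) (stop : (List Int × UInt64) → Bool) :
    Nat → Nat → Option (Option Nat)
  | _, 0 => none
  | j, n + 1 =>
    match tbl.getD j none with
    | none => some (some j)
    | some e => if stop e then some none else pvLinB tbl stop (j + 1) n

def pvFindB (tbl : List (Option (List Int × UInt64))) (mask : Nat) (h : UInt64)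
    (key : List Int) : Nat → Nat → Nat → Option Nat
  | 0, _, _ => some 0  -- fuel, never reached
  | fuel + 1, i, perturb =>
    match tbl.getD i none with
    | none => some i
    | some e =>
      if e.2 = h ∧ e.1 = key then none
      else
        match (if i + 9 ≤ mask
               then pvLinB tbl (fun e => decide (e.2 = h ∧ e.1 = key)) (i + 1) 9
               else none) with
        | some r => r
        | none => pvFindB tbl mask h key fuel ((i * 5 + 1 + (perturb >>> 5)) &&& mask)
            (perturb >>> 5)

def pvCleanB (tbl : List (Option (List Int × UInt64))) (mask : Nat) :
    Nat → Nat → Nat → Nat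
  | 0, i, _ => i
  | fuel + 1, i, perturb =>
    match tbl.getD i none with
    | none => i
    | some _ =>
      match (if i + 9 ≤ mask then pvLinB tbl (fun _ => false) (i + 1) 9 else none) with
      | some (some j) => j
      | _ => pvCleanB tbl mask fuel ((i * 5 + 1 + (perturb >>> 5)) &&& mask) (perturb >>> 5)

def pvInsClnB (tbl : List (Option (List Int × UInt64))) (e : List Int × UInt64) :
    List (Option (List Int × UInt64)) :=
  let mask := tbl.length - 1
  tbl.set (pvCleanB tbl mask (tbl.length * 64 + 64) (e.2.toNat &&& mask) e.2.toNat) (some e)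

def pvSzStepB (m a : Nat) : Nat := if a ≤ m then 2 * a else a

def pvSzB (m : Nat) : Nat → Nat → Nat
  | 0, a => a
  | n + 1, a => pvSzB m n (pvSzStepB m a)

def pvNewSizeB (minused : Nat) : Nat := pvSzB minused 64 8

def pvEntriesB (tbl : List (Option (List Int × UInt64))) : List (List Int × UInt64) :=
  tbl.foldr (fun o acc => match o with | some e => e :: acc | none => acc) []

structure PvTblB where
  data : List (Option (List Int × UInt64))
  used : Nat
  fill : Nat
  deriving Repr, DecidableEq

def pvEmptyB : PvTblB := ⟨List.replicate 8 none, 0, 0⟩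

def pvGrowB (s : PvTblB) (minused : Nat) : PvTblB :=
  ⟨(pvEntriesB s.data).foldl pvInsClnB (List.replicate (pvNewSizeB minused) none),
    s.used, s.used⟩

def pvAddB (s : PvTblB) (key : List Int) : PvTblB :=
  let h := pvHashTupleB key
  let mask := s.data.length - 1
  match pvFindB s.data mask h key (s.data.length * 64 + 64) (h.toNat &&& mask) h.toNat with
  | none => s
  | some i =>
    let s' : PvTblB := ⟨s.data.set i (some (key, h)), s.used + 1, s.fill + 1⟩
    if s'.fill * 5 ≥ mask * 3 then
      pvGrowB s' (if s'.used ≤ 50000 then s'.used * 4 else s'.used * 2)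
    else s'

def pvElemsB (s : PvTblB) : List (List Int) := (pvEntriesB s.data).map (fun e => e.1)

def pvCopyB (s : PvTblB) : PvTblB :=
  let newsize := if s.used * 5 ≥ 21 then pvNewSizeB (s.used * 2) else 8
  if newsize = s.data.length then ⟨s.data, s.used, s.fill⟩
  else ⟨(pvEntriesB s.data).foldl pvInsClnB (List.replicate newsize none), s.used, s.used⟩

def pvDiffB (s : PvTblB) (notInOther : List Int → Bool) (otherSize : Nat) :
    List (List Int) :=
  if s.used / 4 > otherSize then
    (pvElemsB (pvCopyB s)).filter notInOther
  else
    pvElemsB (((pvElemsB s).filter notInOther).foldl pvAddB pvEmptyB)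

-- votes[t] = votes.get(t, 0) + 1 over all jobs of all solutions
def pvVotesB (bs : List (List (List Int))) : PySem.Dict (List Int) Int :=
  bs.foldl (fun d sol => sol.foldl (fun d job => d.insert job (d.getD job 0 + 1)) d)
    PySem.Dict.empty

def create_woc_solution_alt (best_solutions : List (List (List Int))) : List (List Int) :=
  let votes := pvVotesB best_solutions
  let k := (best_solutions.headD []).length  -- len(best_solutions[0]); IndexError on [] (Pre_)
  -- sorted(votes, key=lambda t: votes[t], reverse=True)
  let ordered := PySem.List.sorted votes.keys (fun t => votes.getD t 0) true
  -- ordered[:k] (k ≥ 0, so the slice is take); 'list(t)' is the identity under the type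
  -- convention (tuples and lists of ints are both List Int)
  let woc := ordered.take k
  -- added_jobs = set(ordered[:k]): a set of already-distinct elements, kept as their list
  -- (only its membership test and size are used below)
  let added : PySem.Set (List Int) := ordered.take k
  -- all_jobs = {tuple(job) for solution in best_solutions for job in solution} (a CPython set)
  let all_jobs : PvTblB :=
    best_solutions.foldl (fun s sol => sol.foldl pvAddB s) pvEmptyB
  -- for job in all_jobs - added_jobs: woc_solution.append(list(job))
  woc ++ pvDiffB all_jobs (fun t => !added.contains t) added.length

-- ===== PRECONDITION & SPEC =====

-- Pre_ excludes exactly the inputs on which A raises: the empty list (IndexError on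
-- best_solutions[0]) and inputs with fewer distinct jobs than positions in the first solution
-- (ValueError: max of the emptied dict).
def Pre_create_woc_solution (best_solutions : List (List (List Int))) : Prop :=
  best_solutions ≠ [] ∧
  (best_solutions.headD []).length ≤ (PySem.Set.ofList best_solutions.flatten).length

instance (best_solutions : List (List (List Int))) : Decidable (Pre_create_woc_solution best_solutions) := by
  unfold Pre_create_woc_solution; infer_instance

def pvWitness_create_woc_solution : List (List (List Int)) := [[[1], [2]], [[2], [1]]]

def Spec_create_woc_solution (best_solutions : List (List (List Int))) (out : List (List Int)) : Prop :=
  out = create_woc_solution_alt best_solutions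

instance (best_solutions : List (List (List Int))) (out : List (List Int)) : Decidable (Spec_create_woc_solution best_solutions out) := by
  unfold Spec_create_woc_solution; infer_instance

-- ===== CLAIM (what is proved, stated in full; the proofs are below) =====
def Claim_equal_create_woc_solution : Prop := ∀ (best_solutions : List (List (List Int))), Dom_create_woc_solution best_solutions → Pre_create_woc_solution best_solutions → Spec_create_woc_solution best_solutions (create_woc_solution best_solutions)

-- ===== LEMMAS AND PROOFS =====

-- ---- bridge: B's set model equals A's set model ----

def pvSw (e : List Int × UInt64) : UInt64 × List Int := (e.2, e.1)

def pvToA (s : PvTblB) : PvPySet := ⟨s.data.map (Option.map pvSw), s.fill, s.used⟩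

theorem pvHashIntAB : pvHashIntB = pvHashInt := by
  funext i
  simp only [pvHashIntB, pvHashInt]
  split_ifs <;> first | rfl | omega

theorem pvHashAccAB : ∀ (t : List Int) (acc : UInt64),
    pvHashAccB acc t = t.foldl (fun acc it =>
      let acc := acc + pvHashInt it * (14029467366897019727 : UInt64)
      let acc := (acc <<< 31) ||| (acc >>> 33)
      acc * (11400714785074694791 : UInt64)) acc := by
  intro t
  induction t with
  | nil => intro acc; rfl
  | cons it rest ih =>
    intro acc
    show pvHashAccB (pvHashStepB acc it) rest = _
    rw [ih]
    unfold pvHashStepB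
    rw [pvHashIntAB]
    rfl

theorem pvHashTupleAB (t : List Int) : pvHashTupleB t = pvHashTuple t := by
  unfold pvHashTupleB pvHashTuple
  rw [pvHashAccAB]

theorem pvSlotAB (tbl : List (Option (List Int × UInt64))) (i : Nat) :
    pvSlot (tbl.map (Option.map pvSw)) i = (tbl.getD i none).map pvSw := by
  unfold pvSlot
  rw [List.getD_eq_getElem?_getD, List.getD_eq_getElem?_getD, List.getElem?_map]
  cases tbl[i]? with
  | none => rfl
  | some o => cases o <;> rfl

theorem pvScanAB (tbl : List (Option (List Int × UInt64))) (h : UInt64) (key : List Int) :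
    ∀ (n j : Nat),
    pvScan (tbl.map (Option.map pvSw)) h key (List.range' j n)
      = pvLinB tbl (fun e => decide (e.2 = h ∧ e.1 = key)) j n := by
  intro n
  induction n with
  | zero => intro j; rfl
  | succ n ih =>
    intro j
    rw [List.range'_succ]
    simp only [pvScan, pvLinB, pvSlotAB]
    cases tbl.getD j none with
    | none => rfl
    | some e =>
      simp only [Option.map_some]
      by_cases hc : e.2 = h ∧ e.1 = key
      · rw [if_pos (show (pvSw e).1 = h ∧ (pvSw e).2 = key from hc), if_pos (by simpa using hc)]
      · rw [if_neg (show ¬((pvSw e).1 = h ∧ (pvSw e).2 = key) from hc),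
          if_neg (by simpa using hc), ih]

theorem pvLinFalse_ne (tbl : List (Option (List Int × UInt64))) :
    ∀ (n j : Nat), pvLinB tbl (fun _ => false) j n ≠ some none := by
  intro n
  induction n with
  | zero => intro j h; cases h
  | succ n ih =>
    intro j
    simp only [pvLinB]
    cases tbl.getD j none with
    | none => intro h; cases h
    | some e =>
      dsimp only
      rw [if_neg (by simp)]
      exact ih (j + 1)

theorem pvScanCleanAB (tbl : List (Option (List Int × UInt64))) :
    ∀ (n j : Nat),
    pvScanClean (tbl.map (Option.map pvSw)) (List.range' j n)
      = (match pvLinB tbl (fun _ => false) j n with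
         | some (some j') => some j'
         | _ => none) := by
  intro n
  induction n with
  | zero => intro j; rfl
  | succ n ih =>
    intro j
    rw [List.range'_succ]
    simp only [pvScanClean, pvLinB, pvSlotAB]
    cases tbl.getD j none with
    | none => rfl
    | some e =>
      simp only [Option.map_some]
      rw [if_neg (by simp), ih]

theorem pvRangeMap (i : Nat) :
    (List.range 9).map (fun j => i + 1 + j) = List.range' (i + 1) 9 := by
  rw [List.range'_eq_map_range]

theorem pvFindAB (tbl : List (Option (List Int × UInt64))) (mask : Nat) (h : UInt64)
    (key : List Int) : ∀ (fuel i perturb : Nat),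
    pvFindSlot (tbl.map (Option.map pvSw)) mask h key fuel i perturb
      = pvFindB tbl mask h key fuel i perturb := by
  intro fuel
  induction fuel with
  | zero => intro i perturb; rfl
  | succ fuel ih =>
    intro i perturb
    simp only [pvFindSlot, pvFindB, pvSlotAB, pvRangeMap, pvScanAB]
    cases tbl.getD i none with
    | none => rfl
    | some e =>
      simp only [Option.map_some]
      by_cases hc : e.2 = h ∧ e.1 = key
      · rw [if_pos (show (pvSw e).1 = h ∧ (pvSw e).2 = key from hc), if_pos hc]
      · rw [if_neg (show ¬((pvSw e).1 = h ∧ (pvSw e).2 = key) from hc), if_neg hc, ih]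

theorem pvCleanAB (tbl : List (Option (List Int × UInt64))) (mask : Nat) :
    ∀ (fuel i perturb : Nat),
    pvCleanSlot (tbl.map (Option.map pvSw)) mask fuel i perturb
      = pvCleanB tbl mask fuel i perturb := by
  intro fuel
  induction fuel with
  | zero => intro i perturb; rfl
  | succ fuel ih =>
    intro i perturb
    simp only [pvCleanSlot, pvCleanB, pvSlotAB, pvRangeMap, pvScanCleanAB]
    cases tbl.getD i none with
    | none => rfl
    | some e =>
      simp only [Option.map_some]
      by_cases hle : i + 9 ≤ mask
      · rw [if_pos hle, if_pos hle]
        cases hlin : pvLinB tbl (fun _ => false) (i + 1) 9 with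
        | none => exact ih _ _
        | some o =>
          cases o with
          | none => exact absurd hlin (pvLinFalse_ne tbl 9 (i + 1))
          | some j => rfl
      · rw [if_neg hle, if_neg hle]
        exact ih _ _

theorem pvEntriesAB : ∀ (tbl : List (Option (List Int × UInt64))),
    (tbl.map (Option.map pvSw)).filterMap id = (pvEntriesB tbl).map pvSw := by
  intro tbl
  induction tbl with
  | nil => rfl
  | cons o rest ih =>
    cases o with
    | none =>
      rw [show pvEntriesB (none :: rest) = pvEntriesB rest from rfl]
      simpa [List.filterMap_cons] using ih
    | some e =>
      rw [show pvEntriesB (some e :: rest) = e :: pvEntriesB rest from rfl]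
      simpa [List.filterMap_cons] using ih

theorem pvInsClnAB (tbl : List (Option (List Int × UInt64))) (e : List Int × UInt64) :
    pvInsertClean (tbl.map (Option.map pvSw)) (pvSw e)
      = (pvInsClnB tbl e).map (Option.map pvSw) := by
  simp only [pvInsertClean, pvInsClnB, List.length_map, pvCleanAB]
  rw [show (pvSw e).1 = e.2 from rfl, List.map_set]
  rfl

theorem pvIterFold {α : Type} (f : α → α) : ∀ (n : Nat) (a : α),
    (List.range n).foldl (fun acc _ => f acc) a = f^[n] a := by
  intro n
  induction n with
  | zero => intro a; rfl
  | succ n ih =>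
    intro a
    rw [List.range_succ, List.foldl_append, ih, Function.iterate_succ_apply']
    rfl

theorem pvSzIter (m : Nat) : ∀ (n a : Nat), pvSzB m n a = (pvSzStepB m)^[n] a := by
  intro n
  induction n with
  | zero => intro a; rfl
  | succ n ih =>
    intro a
    show pvSzB m n (pvSzStepB m a) = _
    rw [ih, Function.iterate_succ_apply]

theorem pvNewSizeAB (m : Nat) : pvNewSize m = pvNewSizeB m := by
  unfold pvNewSize pvNewSizeB
  rw [pvSzIter]
  have : (fun acc _ => if acc ≤ m then acc * 2 else acc)
      = (fun acc (_ : Nat) => pvSzStepB m acc) := by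
    funext acc x
    unfold pvSzStepB
    rw [Nat.mul_comm]
  rw [this, pvIterFold]

theorem pvFoldInsAB : ∀ (l : List (List Int × UInt64))
    (init : List (Option (List Int × UInt64))),
    (l.map pvSw).foldl pvInsertClean (init.map (Option.map pvSw))
      = (l.foldl pvInsClnB init).map (Option.map pvSw) := by
  intro l
  induction l with
  | nil => intro init; rfl
  | cons e rest ih =>
    intro init
    show (rest.map pvSw).foldl pvInsertClean (pvInsertClean (init.map (Option.map pvSw)) (pvSw e))
      = _
    rw [pvInsClnAB, ih]
    rfl

theorem pvReplicateSw (n : Nat) :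
    ((List.replicate n none : List (Option (List Int × UInt64))).map (Option.map pvSw))
      = List.replicate n none := by
  simp

theorem pvGrowAB (s : PvTblB) (m : Nat) :
    pvSetResize (pvToA s) m = pvToA (pvGrowB s m) := by
  simp only [pvSetResize, pvGrowB, pvToA]
  rw [pvEntriesAB, pvNewSizeAB, ← pvReplicateSw (pvNewSizeB m), pvFoldInsAB]

theorem pvAddAB (s : PvTblB) (key : List Int) :
    pvSetAdd (pvToA s) key = pvToA (pvAddB s key) := by
  have htab : (pvToA s).table = s.data.map (Option.map pvSw) := rfl
  have hfill : (pvToA s).fill = s.fill := rfl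
  have hused : (pvToA s).used = s.used := rfl
  simp only [pvSetAdd, pvAddB, htab, hfill, hused, List.length_map, pvHashTupleAB, pvFindAB]
  cases hf : pvFindB s.data (s.data.length - 1) (pvHashTuple key) key
      (s.data.length * 64 + 64) ((pvHashTuple key).toNat &&& (s.data.length - 1))
      (pvHashTuple key).toNat with
  | none => rfl
  | some i =>
    dsimp only
    have hset : (⟨(s.data.map (Option.map pvSw)).set i (some (pvHashTuple key, key)),
        s.fill + 1, s.used + 1⟩ : PvPySet)
        = pvToA ⟨s.data.set i (some (key, pvHashTuple key)), s.used + 1, s.fill + 1⟩ := by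
      simp only [pvToA, List.map_set]
      rfl
    by_cases hc : (s.fill + 1) * 5 ≥ (s.data.length - 1) * 3
    · rw [if_pos hc, if_pos hc, hset, pvGrowAB]
    · rw [if_neg hc, if_neg hc, hset]

theorem pvElemsAB (s : PvTblB) : pvSetElems (pvToA s) = pvElemsB s := by
  simp only [pvSetElems, pvElemsB]
  rw [show (pvToA s).table = s.data.map (Option.map pvSw) from rfl, pvEntriesAB, List.map_map]
  rfl

theorem pvCopyAB (s : PvTblB) : pvSetCopy (pvToA s) = pvToA (pvCopyB s) := by
  simp only [pvSetCopy, pvCopyB,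
    show (pvToA s).table = s.data.map (Option.map pvSw) from rfl,
    show (pvToA s).used = s.used from rfl,
    show (pvToA s).fill = s.fill from rfl, List.length_map, pvNewSizeAB]
  by_cases hc : (if s.used * 5 ≥ 21 then pvNewSizeB (s.used * 2) else 8) = s.data.length
  · rw [if_pos hc, if_pos hc]
    rfl
  · rw [if_neg hc, if_neg hc]
    simp only [pvToA]
    rw [pvEntriesAB, ← pvReplicateSw, pvFoldInsAB]

theorem pvEmptyAB : pvToA pvEmptyB = pvEmptySet := by
  unfold pvToA pvEmptyB pvEmptySet
  simp

theorem pvFoldAddAB : ∀ (l : List (List Int)) (s : PvTblB),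
    l.foldl pvSetAdd (pvToA s) = pvToA (l.foldl pvAddB s) := by
  intro l
  induction l with
  | nil => intro s; rfl
  | cons x rest ih =>
    intro s
    show rest.foldl pvSetAdd (pvSetAdd (pvToA s) x) = _
    rw [pvAddAB, ih]
    rfl

theorem pvDiffAB (s : PvTblB) (g : List Int → Bool) (n : Nat) :
    pvSetDiffElems (pvToA s) g n = pvDiffB s g n := by
  simp only [pvSetDiffElems, pvDiffB, show (pvToA s).used = s.used from rfl]
  by_cases hc : s.used / 4 > n
  · rw [if_pos hc, if_pos hc, pvCopyAB, pvElemsAB]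
  · rw [if_neg hc, if_neg hc, pvElemsAB, ← pvEmptyAB, pvFoldAddAB, pvElemsAB]

theorem pvAllJobsAB (bs : List (List (List Int))) :
    bs.foldl (fun s sol => sol.foldl pvSetAdd s) pvEmptySet
      = pvToA (bs.foldl (fun s sol => sol.foldl pvAddB s) pvEmptyB) := by
  have aux : ∀ (l : List (List (List Int))) (s : PvTblB),
      l.foldl (fun s sol => sol.foldl pvSetAdd s) (pvToA s)
        = pvToA (l.foldl (fun s sol => sol.foldl pvAddB s) s) := by
    intro l
    induction l with
    | nil => intro s; rfl
    | cons sol rest ih =>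
      intro s
      show rest.foldl _ (sol.foldl pvSetAdd (pvToA s)) = _
      rw [pvFoldAddAB, ih]
      rfl
  rw [← pvEmptyAB, aux]

-- ---- both vote dicts are Counter(flattened jobs) ----

theorem pvVoteStepAEq (d : PySem.Dict (List Int) Int) (t : List Int) :
    pvVoteStepA d t = d.modify t 0 (fun v => v + 1) := by
  unfold pvVoteStepA PySem.Dict.modify
  by_cases h : d.contains t
  · simp [h]
  · simp only [h, Bool.false_eq_true, if_false]
    rw [PySem.Dict.getD_insert_self, PySem.Dict.insert_insert_self,
      PySem.Dict.getD_of_not_contains d 0 (by simpa using h)]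

theorem pvVotesA_eq (bs : List (List (List Int))) :
    pvVotesA bs = PySem.Dict.counter bs.flatten := by
  have h1 : ∀ (sol : List (List Int)) (d : PySem.Dict (List Int) Int),
      (PySem.List.enumerate sol 0).foldl (fun d pj => pvVoteStepA d pj.2) d
        = sol.foldl pvVoteStepA d := by
    intro sol d
    calc (PySem.List.enumerate sol 0).foldl (fun d pj => pvVoteStepA d pj.2) d
        = (List.map (fun x => x.2) (PySem.List.enumerate sol 0)).foldl pvVoteStepA d :=
          List.foldl_map.symm
      _ = sol.foldl pvVoteStepA d := by rw [PySem.List.map_snd_enumerate]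
  have h2 : pvVoteStepA = fun d t => d.modify t 0 (fun v => v + 1) := by
    funext d t; exact pvVoteStepAEq d t
  unfold pvVotesA PySem.Dict.counter
  rw [List.foldl_flatten]
  simp only [h1]
  simp only [h2]

theorem pvVotesB_eq (bs : List (List (List Int))) :
    pvVotesB bs = PySem.Dict.counter bs.flatten := by
  unfold pvVotesB PySem.Dict.counter
  rw [List.foldl_flatten]
  rfl

-- ---- dict erase facts ----

theorem pvMapFilterFst (items : List ((List Int) × Int)) (m : List Int) :
    (items.filter (fun p => !(p.1 == m))).map (fun p => p.1)
      = (items.map (fun p => p.1)).filter (fun t => !(t == m)) := by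
  induction items with
  | nil => rfl
  | cons p ps ih => by_cases h : p.1 = m <;> simp [h, ih]

theorem pvKeysErase (d : PySem.Dict (List Int) Int) (m : List Int) :
    (d.erase m).keys = d.keys.filter (fun t => !(t == m)) := by
  show (d.items.filter (fun p => !(p.1 == m))).map (fun p => p.1)
      = (d.items.map (fun p => p.1)).filter (fun t => !(t == m))
  exact pvMapFilterFst d.items m

theorem pvFindFilter (items : List ((List Int) × Int)) (m t : List Int) (h : t ≠ m) :
    (items.filter (fun p => !(p.1 == m))).find? (fun p => p.1 == t)
      = items.find? (fun p => p.1 == t) := by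
  induction items with
  | nil => rfl
  | cons p ps ih =>
    by_cases h1 : p.1 = m
    · rw [List.filter_cons_of_neg (by simp [h1]),
        List.find?_cons_of_neg (by simp [h1]; exact fun hh => h hh.symm), ih]
    · by_cases h2 : p.1 = t
      · rw [List.filter_cons_of_pos (by simp [h1]), List.find?_cons_of_pos (by simp [h2]),
          List.find?_cons_of_pos (by simp [h2])]
      · rw [List.filter_cons_of_pos (by simp [h1]), List.find?_cons_of_neg (by simp [h2]),
          List.find?_cons_of_neg (by simp [h2]), ih]

theorem pvGetDErase (d : PySem.Dict (List Int) Int) (m t : List Int) (h : t ≠ m) :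
    (d.erase m).getD t 0 = d.getD t 0 := by
  show (Option.map (fun x => x.2)
      ((d.items.filter (fun p => !(p.1 == m))).find? (fun p => p.1 == t))).getD 0
    = (Option.map (fun x => x.2) (d.items.find? (fun p => p.1 == t))).getD 0
  rw [pvFindFilter d.items m t h]

theorem pvSizeErase (d : PySem.Dict (List Int) Int) (m : List Int)
    (hnd : d.keys.Nodup) (h : m ∈ d.keys) : (d.erase m).size = d.size - 1 := by
  show (d.items.filter (fun p => !(p.1 == m))).length = d.items.length - 1
  rw [← List.countP_eq_length_filter]
  have hlen : d.items.length = d.items.countP (fun p => p.1 == m)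
      + d.items.countP (fun p => !(p.1 == m)) := by
    have h0 := List.length_eq_countP_add_countP (p := fun p : (List Int) × Int => p.1 == m)
      (l := d.items)
    have h1 : d.items.countP (fun a => !decide (a.1 = m)) = d.items.countP (fun p => !(p.1 == m)) := by
      apply List.countP_congr; intro a _; simp
    simpa [h1] using h0
  have hc : d.items.countP (fun p => p.1 == m) = 1 := by
    have h1 : d.items.countP (fun p => p.1 == m) = d.keys.countP (fun x => x == m) := by
      show _ = (d.items.map (fun p => p.1)).countP (fun x => x == m)
      rw [List.countP_map]; rfl
    rw [h1, ← List.count]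
    exact List.count_eq_one_of_mem hnd h
  omega

-- ---- first-maximum characterisation of max? (Python's max keeps the earliest maximum) ----

def pvMaxA (f : List Int → Int) (a : List Int) (t : List (List Int)) : List Int :=
  t.foldl (fun a x => if f a < f x then x else a) a

theorem pvMax?_cons (f : List Int → Int) : ∀ (t : List (List Int)) (x : List Int),
    PySem.List.max? (x :: t) f = some (pvMaxA f x t) := by
  intro t
  induction t with
  | nil => intro x; rfl
  | cons y t ih =>
    intro x
    have h1 : PySem.List.max? (x :: y :: t) f
        = PySem.List.max? ((if f x < f y then y else x) :: t) f := by
      show List.foldl _ (if f x < f y then some y else some x) t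
        = List.foldl _ (some (if f x < f y then y else x)) t
      by_cases h : f x < f y
      · rw [if_pos h, if_pos h]
      · rw [if_neg h, if_neg h]
    have h2 : pvMaxA f x (y :: t) = pvMaxA f (if f x < f y then y else x) t := by
      simp [pvMaxA, List.foldl_cons]
    rw [h1, ih, h2]

theorem pvLeMaxA (f : List Int → Int) : ∀ (t : List (List Int)) (a : List Int),
    f a ≤ f (pvMaxA f a t) := by
  intro t
  induction t with
  | nil => intro a; exact le_refl _
  | cons y t ih =>
    intro a
    have h1 : pvMaxA f a (y :: t) = pvMaxA f (if f a < f y then y else a) t := by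
      simp [pvMaxA, List.foldl_cons]
    rw [h1]
    by_cases h : f a < f y
    · rw [if_pos h]; exact le_of_lt (lt_of_lt_of_le h (ih y))
    · rw [if_neg h]; exact ih a

theorem pvMaxA_first (f : List Int → Int) : ∀ (t : List (List Int)) (a : List Int),
    ∃ l1 l2, a :: t = l1 ++ pvMaxA f a t :: l2 ∧ ∀ y ∈ l1, f y < f (pvMaxA f a t) := by
  intro t
  induction t with
  | nil => intro a; exact ⟨[], [], rfl, by intro y hy; cases hy⟩
  | cons y t ih =>
    intro a
    have h1 : pvMaxA f a (y :: t) = pvMaxA f (if f a < f y then y else a) t := by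
      simp [pvMaxA, List.foldl_cons]
    by_cases h : f a < f y
    · rw [h1, if_pos h]
      obtain ⟨l1, l2, heq, hlt⟩ := ih y
      refine ⟨a :: l1, l2, by rw [List.cons_append, ← heq], ?_⟩
      intro z hz
      rcases List.mem_cons.mp hz with rfl | hz
      · exact lt_of_lt_of_le h (pvLeMaxA f t y)
      · exact hlt z hz
    · rw [h1, if_neg h]
      obtain ⟨l1, l2, heq, hlt⟩ := ih a
      cases l1 with
      | nil =>
        simp only [List.nil_append, List.cons.injEq] at heq
        refine ⟨[], y :: t, ?_, by intro z hz; cases hz⟩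
        rw [List.nil_append, ← heq.1]
      | cons b l1' =>
        simp only [List.cons_append, List.cons.injEq] at heq
        refine ⟨a :: y :: l1', l2, ?_, ?_⟩
        · simp only [List.cons_append, List.cons.injEq]
          exact ⟨trivial, trivial, heq.2⟩
        · intro z hz
          have hma : f a < f (pvMaxA f a t) := hlt a (by rw [heq.1]; exact List.mem_cons_self)
          rcases List.mem_cons.mp hz with rfl | hz
          · exact hma
          rcases List.mem_cons.mp hz with rfl | hz
          · exact lt_of_le_of_lt (le_of_not_gt h) hma
          · exact hlt z (List.mem_cons_of_mem _ hz)

-- ---- max2? with a constant second key is max? ----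

theorem pvMax2Const : ∀ (l : List (List Int)) (k1 : List Int → Int) (k2 : List Int → Bool),
    (∀ x ∈ l, k2 x = true) → PySem.List.max2? l k1 k2 = PySem.List.max? l k1 := by
  have aux : ∀ (t : List (List Int)) (k1 : List Int → Int) (k2 : List Int → Bool)
      (x : List Int), k2 x = true → (∀ z ∈ t, k2 z = true) →
      PySem.List.max2? (x :: t) k1 k2 = PySem.List.max? (x :: t) k1 := by
    intro t
    induction t with
    | nil => intro k1 k2 x _ _; rfl
    | cons y t ih =>
      intro k1 k2 x hx ht
      have hy : k2 y = true := ht y List.mem_cons_self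
      have hcond : (decide (k1 x < k1 y) || (!decide (k1 y < k1 x) && decide (k2 x < k2 y)))
          = decide (k1 x < k1 y) := by
        rw [hx, hy]
        have : decide ((true : Bool) < true) = false := by decide
        rw [this]
        simp
      rw [pvMax2Cons, hcond]
      rw [show (if decide (k1 x < k1 y) = true then y else x) = (if k1 x < k1 y then y else x)
        from by by_cases h : k1 x < k1 y <;> simp [h]]
      have hstep : PySem.List.max? (x :: y :: t) k1
          = PySem.List.max? ((if k1 x < k1 y then y else x) :: t) k1 := by
        show List.foldl _ (if k1 x < k1 y then some y else some x) t
          = List.foldl _ (some (if k1 x < k1 y then y else x)) t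
        by_cases h : k1 x < k1 y
        · rw [if_pos h, if_pos h]
        · rw [if_neg h, if_neg h]
      rw [hstep]
      have hz : k2 (if k1 x < k1 y then y else x) = true := by
        by_cases h : k1 x < k1 y
        · rw [if_pos h]; exact hy
        · rw [if_neg h]; exact hx
      exact ih k1 k2 _ hz (fun z hzt => ht z (List.mem_cons_of_mem _ hzt))
  intro l k1 k2 h
  cases l with
  | nil => rfl
  | cons x t =>
    exact aux t k1 k2 x (h x List.mem_cons_self) (fun z hz => h z (List.mem_cons_of_mem _ hz))

-- ---- stability of PySem's descending insertion sort ----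

-- the strict 'comes first in sorted(l, key=f, reverse=True)' order, relative to ambient list L
def pvRel (L : List (List Int)) (f : List Int → Int) (a b : List Int) : Prop :=
  f b < f a ∨ (f a = f b ∧ L.idxOf a < L.idxOf b)

theorem pvRelLe {L : List (List Int)} {f : List Int → Int} {a b : List Int}
    (h : pvRel L f a b) : f b ≤ f a := by
  rcases h with h | ⟨h, _⟩
  · exact le_of_lt h
  · exact le_of_eq h.symm

theorem pvSubIdxLt (y x : List Int) : ∀ (L : List (List Int)), L.Nodup →
    [y, x].Sublist L → L.idxOf y < L.idxOf x := by
  intro L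
  induction L with
  | nil => intro _ h; cases h
  | cons a L' ih =>
    intro hnd h
    have hand := List.nodup_cons.mp hnd
    cases h with
    | cons _ h' =>
      have hyL : y ∈ L' := h'.subset List.mem_cons_self
      have hxL : x ∈ L' := h'.subset (List.mem_cons_of_mem _ List.mem_cons_self)
      have hya : y ≠ a := fun he => hand.1 (he ▸ hyL)
      have hxa : x ≠ a := fun he => hand.1 (he ▸ hxL)
      rw [List.idxOf_cons_ne _ (Ne.symm hya), List.idxOf_cons_ne _ (Ne.symm hxa)]
      exact Nat.succ_lt_succ (ih hand.2 h')
    | cons₂ _ h' =>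
      have hxL : x ∈ L' := h'.subset List.mem_cons_self
      have hxa : x ≠ y := fun he => hand.1 (he ▸ hxL)
      rw [List.idxOf_cons_self, List.idxOf_cons_ne _ (Ne.symm hxa)]
      exact Nat.succ_pos _

theorem pvInsertByPairwise (L : List (List Int)) (f : List Int → Int) (x : List Int) :
    ∀ (acc : List (List Int)), acc.Pairwise (pvRel L f) →
    (∀ y ∈ acc, f x = f y → L.idxOf y < L.idxOf x) →
    (PySem.List.insertBy (fun a b => decide (f b < f a)) x acc).Pairwise (pvRel L f) := by
  intro acc
  induction acc with
  | nil => intro _ _; simp [PySem.List.insertBy, List.pairwise_cons]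
  | cons y ys ih =>
    intro h1 h2
    have h1' := List.pairwise_cons.mp h1
    rw [show PySem.List.insertBy (fun a b => decide (f b < f a)) x (y :: ys)
        = if decide (f y < f x) then x :: y :: ys
          else y :: PySem.List.insertBy (fun a b => decide (f b < f a)) x ys
      from by simp [PySem.List.insertBy]]
    by_cases h : f y < f x
    · rw [if_pos (by simpa using h)]
      refine List.pairwise_cons.mpr ⟨?_, h1⟩
      intro z hz
      rcases List.mem_cons.mp hz with rfl | hz
      · exact Or.inl h
      · exact Or.inl (lt_of_le_of_lt (pvRelLe (h1'.1 z hz)) h)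
    · rw [if_neg (by simpa using h)]
      refine List.pairwise_cons.mpr ⟨?_, ?_⟩
      · intro z hz
        rcases (PySem.List.mem_insertBy _ _ _ _).mp hz with rfl | hz
        · rcases lt_trichotomy (f z) (f y) with hlt | heq | hgt
          · exact Or.inl hlt
          · exact Or.inr ⟨heq.symm, h2 y List.mem_cons_self heq⟩
          · exact absurd hgt h
        · exact h1'.1 z hz
      · exact ih h1'.2 (fun z hz => h2 z (List.mem_cons_of_mem _ hz))

theorem pvSortedSnoc (s : List (List Int)) (x : List Int) (f : List Int → Int) :
    PySem.List.sorted (s ++ [x]) f true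
      = PySem.List.insertBy (fun a b => decide (f b < f a)) x (PySem.List.sorted s f true) := by
  rw [PySem.List.sorted_rev_eq_foldl_insertBy, PySem.List.sorted_rev_eq_foldl_insertBy,
    List.foldl_append]
  rfl

theorem pvSortedStab (f : List Int → Int) :
    ∀ (l L : List (List Int)), l.Sublist L → L.Nodup →
    (PySem.List.sorted l f true).Pairwise (pvRel L f) := by
  intro l
  induction l using List.reverseRecOn with
  | nil => intro L _ _; simp [PySem.List.sorted_rev_eq_foldl_insertBy]
  | append_singleton s x ih =>
    intro L hsub hnd
    have hs : s.Sublist L := (List.sublist_append_left s [x]).trans hsub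
    rw [pvSortedSnoc]
    apply pvInsertByPairwise L f x _ (ih L hs hnd)
    intro y hy _
    have hymem : y ∈ s := (PySem.List.mem_sorted _ _ _ _).mp hy
    apply pvSubIdxLt y x L hnd
    have hyx : [y, x].Sublist (s ++ [x]) :=
      List.Sublist.append (List.singleton_sublist.mpr hymem) (List.Sublist.refl [x])
    exact hyx.trans hsub

theorem pvInsertByCongr (x : List Int) (bf bg : List Int → List Int → Bool) :
    ∀ (acc : List (List Int)), (∀ y ∈ acc, bf x y = bg x y) →
    PySem.List.insertBy bf x acc = PySem.List.insertBy bg x acc := by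
  intro acc
  induction acc with
  | nil => intro _; rfl
  | cons y ys ih =>
    intro h
    rw [show PySem.List.insertBy bf x (y :: ys)
        = if bf x y then x :: y :: ys else y :: PySem.List.insertBy bf x ys
      from by simp [PySem.List.insertBy]]
    rw [show PySem.List.insertBy bg x (y :: ys)
        = if bg x y then x :: y :: ys else y :: PySem.List.insertBy bg x ys
      from by simp [PySem.List.insertBy]]
    rw [h y List.mem_cons_self]
    by_cases hc : bg x y = true
    · rw [if_pos hc, if_pos hc]
    · rw [if_neg hc, if_neg hc, ih (fun z hz => h z (List.mem_cons_of_mem _ hz))]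

theorem pvSortedCongr (f g : List Int → Int) :
    ∀ (l : List (List Int)), (∀ t ∈ l, f t = g t) →
    PySem.List.sorted l f true = PySem.List.sorted l g true := by
  intro l
  induction l using List.reverseRecOn with
  | nil => intro _; rfl
  | append_singleton s x ih =>
    intro h
    rw [pvSortedSnoc, pvSortedSnoc, ih (fun t ht => h t (List.mem_append_left _ ht))]
    apply pvInsertByCongr
    intro y hy
    have hys : y ∈ s := (PySem.List.mem_sorted _ _ _ _).mp hy
    rw [h y (List.mem_append_left _ hys), h x (List.mem_append_right _ List.mem_cons_self)]

-- the key step: the stable descending sort starts with the first maximum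
theorem pvSortedConsErase (l : List (List Int)) (f : List Int → Int) (m : List Int)
    (hnd : l.Nodup) (hm : PySem.List.max? l f = some m) :
    PySem.List.sorted l f true = m :: PySem.List.sorted (l.erase m) f true := by
  have hmem : m ∈ l := PySem.List.max?_mem hm
  obtain ⟨x, t, rfl⟩ : ∃ x t, l = x :: t := by
    cases l with
    | nil => cases hmem
    | cons x t => exact ⟨x, t, rfl⟩
  have hM : pvMaxA f x t = m := by
    rw [pvMax?_cons] at hm
    exact Option.some.inj hm
  obtain ⟨l1, l2, heq, hlt⟩ := pvMaxA_first f t x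
  rw [hM] at heq hlt
  have hml1 : m ∉ l1 := by
    intro hin
    have := heq ▸ hnd
    rcases List.nodup_append.mp this with ⟨_, _, hdisj⟩
    exact hdisj m hin m List.mem_cons_self rfl
  apply List.eq_of_perm_of_sorted (le := pvRel (x :: t) f)
  · intro a b _ _ hab hba
    exfalso
    rcases hab with h1 | ⟨h1, h1'⟩ <;> rcases hba with h2 | ⟨h2, h2'⟩ <;> omega
  · exact pvSortedStab f (x :: t) (x :: t) (List.Sublist.refl _) hnd
  · refine List.pairwise_cons.mpr ⟨?_, pvSortedStab f ((x :: t).erase m) (x :: t)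
      (List.erase_sublist) hnd⟩
    intro y hy
    have hy' : y ∈ (x :: t).erase m := (PySem.List.mem_sorted _ _ _ _).mp hy
    obtain ⟨hyne, hymem⟩ := (List.Nodup.mem_erase_iff hnd).mp hy'
    have hyle : f y ≤ f m := PySem.List.max?_isMax hm y hymem
    rcases lt_or_eq_of_le hyle with hylt | hyeq
    · exact Or.inl hylt
    · refine Or.inr ⟨hyeq.symm, ?_⟩
      have hyl1 : y ∉ l1 := fun hin => absurd (hlt y hin) (by omega)
      have hyl2 : y ∈ l2 := by
        have : y ∈ l1 ++ m :: l2 := heq ▸ hymem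
        rcases List.mem_append.mp this with h | h
        · exact absurd h hyl1
        · rcases List.mem_cons.mp h with rfl | h
          · exact absurd rfl hyne
          · exact h
      rw [heq, List.idxOf_append, List.idxOf_append, if_neg hml1, if_neg hyl1,
        List.idxOf_cons_self, List.idxOf_cons_ne _ (Ne.symm hyne)]
      omega
  · exact ((PySem.List.sorted_perm _ _ _).trans (List.perm_cons_erase hmem)).trans
      (List.Perm.cons m (PySem.List.sorted_perm _ _ _).symm)

-- ---- A's while loop extracts the first r elements of the stable descending sort ----

theorem pvLoopA_eq (target : Nat) : ∀ (n : Nat)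
    (d : PySem.Dict (List Int) Int) (added : PySem.Set (List Int)) (woc : List (List Int)),
    d.size = n → d.keys.Nodup → (∀ t ∈ d.keys, added.contains t = false) →
    target ≤ woc.length + d.size →
    pvLoopA target d added woc =
      (woc ++ (PySem.List.sorted d.keys (fun t => d.getD t 0) true).take (target - woc.length),
       added ++ (PySem.List.sorted d.keys (fun t => d.getD t 0) true).take (target - woc.length)) := by
  intro n
  induction n using Nat.strong_induction_on with
  | _ n ih =>
    intro d added woc hsize hnd hdisj htarget
    rw [pvLoopA]
    by_cases hlt : woc.length < target
    · simp only [if_pos hlt]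
      have hpos : 0 < d.size := by omega
      have hkeysne : d.keys ≠ [] := by
        intro hk
        have : d.keys.length = 0 := by rw [hk]; rfl
        have : d.items.length = 0 := by
          simpa [PySem.Dict.keys] using this
        simp [PySem.Dict.size] at hpos
        omega
      have hconst : ∀ x ∈ d.keys, (!added.contains x) = true := by
        intro x hx; rw [hdisj x hx]; rfl
      have hmax2 := pvMax2Const d.keys (fun t => d.getD t 0) (fun t => !added.contains t) hconst
      split
      · rename_i hm
        rw [hmax2] at hm
        exact absurd ((PySem.List.max?_eq_none_iff _ _).mp hm) hkeysne
      · rename_i m hm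
        have hm' : PySem.List.max? d.keys (fun t => d.getD t 0) = some m := by
          rw [← hmax2]; exact hm
        have hmmem : m ∈ d.keys := PySem.List.max?_mem hm'
        have hcont : added.contains m = false := hdisj m hmmem
        rw [if_neg (by rw [hcont]; simp)]
        have hsorted := pvSortedConsErase d.keys (fun t => d.getD t 0) m hnd hm'
        have haddm : added.add m = added ++ [m] := by
          show (if PySem.Set.contains added m = true then added else added ++ [m]) = added ++ [m]
          rw [show PySem.Set.contains added m = false from hcont]
          simp
        have hkeys' : (d.erase m).keys = d.keys.erase m := by
          rw [pvKeysErase, List.Nodup.erase_eq_filter hnd m]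
          apply List.filter_congr
          intro t _
          simp [bne]
        have hsz' : (d.erase m).size = n - 1 := by
          rw [pvSizeErase d m hnd hmmem]; omega
        have hnd' : (d.erase m).keys.Nodup := by
          rw [hkeys']; exact hnd.erase m
        have hdisj' : ∀ t ∈ (d.erase m).keys, (added.add m).contains t = false := by
          intro t ht
          rw [hkeys'] at ht
          obtain ⟨htne, htk⟩ := (List.Nodup.mem_erase_iff hnd).mp ht
          rw [haddm]
          show List.contains (added ++ [m]) t = false
          rw [List.contains_append]
          have h1 : List.contains added t = false := hdisj t htk
          have h2 : List.contains [m] t = false := by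
            simp
            exact htne
          rw [h1, h2]
          rfl
        have htarget' : target ≤ (woc ++ [m]).length + (d.erase m).size := by
          rw [List.length_append, hsz']
          simp only [List.length_cons, List.length_nil]
          omega
        rw [ih (n - 1) (by omega) (d.erase m) (added.add m) (woc ++ [m]) hsz' hnd' hdisj'
          htarget']
        have hcongr : PySem.List.sorted (d.erase m).keys (fun t => (d.erase m).getD t 0) true
            = PySem.List.sorted (d.keys.erase m) (fun t => d.getD t 0) true := by
          rw [hkeys']
          exact pvSortedCongr _ _ _
            (fun t ht => pvGetDErase d m t ((List.Nodup.mem_erase_iff hnd).mp ht).1)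
        rw [hcongr, hsorted]
        have hr : target - woc.length = (target - (woc ++ [m]).length) + 1 := by
          rw [List.length_append]; simp only [List.length_cons, List.length_nil]; omega
        rw [hr, List.take_succ_cons, haddm]
        simp [List.append_assoc]
    · simp only [if_neg hlt]
      have : target - woc.length = 0 := by omega
      rw [this]
      simp

-- ---- assembly ----

theorem pvMainEq (bs : List (List (List Int))) (hne : bs ≠ [])
    (hge : (bs.headD []).length ≤ (PySem.Set.ofList bs.flatten).length) :
    create_woc_solution bs = create_woc_solution_alt bs := by
  simp only [create_woc_solution, create_woc_solution_alt]
  rw [pvVotesA_eq, pvVotesB_eq]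
  have hnd : (PySem.Dict.counter bs.flatten).keys.Nodup :=
    PySem.Dict.nodup_keys_counter bs.flatten
  have hsizeC : (PySem.Dict.counter bs.flatten).size
      = (PySem.Dict.counter bs.flatten).keys.length := by
    simp [PySem.Dict.size, PySem.Dict.keys]
  have hloop := pvLoopA_eq (bs.headD []).length (PySem.Dict.counter bs.flatten).size
    (PySem.Dict.counter bs.flatten) PySem.Set.empty [] rfl hnd (fun t _ => rfl)
    (by rw [hsizeC, PySem.Dict.keys_counter]; simpa using hge)
  rw [hloop, pvAllJobsAB, pvDiffAB]
  simp [PySem.Set.empty]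

-- ===== VERDICT (by name: the statements are the Claim_ definitions above) =====
theorem create_woc_solution_spec : Claim_equal_create_woc_solution := by
  intro bs _ hPre
  unfold Pre_create_woc_solution at hPre
  unfold Spec_create_woc_solution
  exact pvMainEq bs hPre.1 hPre.2
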